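-- pv_equiv track=rewrite | github.com/SebinYu-hub/PS2 | solution/72.메모이제이션/72.py | solution
-- ===== SOURCE A (Python) =====
-- def solution(arr):
--     # 최적화 1: 상수로 패턴 정의
--     PATTERN_TOP = 0      # 상단만 선택
--     PATTERN_MID = 1      # 중단만 선택
--     PATTERN_BOT = 2      # 하단만 선택
--     PATTERN_BOTH = 3     # 상단과 하단 선택
--
--     # 최적화 2: 열의 개수 저장
--     n = len(arr[0])
--
--     # 최적화 3: DP 배열 초기화 (첫 번째 열)
--     dp = [0] * 4
--     dp[PATTERN_TOP] = arr[0][0]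
--     dp[PATTERN_MID] = arr[1][0]
--     dp[PATTERN_BOT] = arr[2][0]
--     dp[PATTERN_BOTH] = arr[0][0] + arr[2][0]
--
--     # 최적화 4: 각 열에 대해 최적의 선택 계산
--     for i in range(1, n):
--         curr = [0] * 4
--
--         # 패턴 0: 상단만 선택 가능한 경우
--         curr[PATTERN_TOP] = arr[0][i] + max(dp[PATTERN_MID], dp[PATTERN_BOT])
--
--         # 패턴 1: 중단만 선택 가능한 경우
--         curr[PATTERN_MID] = arr[1][i] + max(dp[PATTERN_TOP], dp[PATTERN_BOT], dp[PATTERN_BOTH])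
--
--         # 패턴 2: 하단만 선택 가능한 경우
--         curr[PATTERN_BOT] = arr[2][i] + max(dp[PATTERN_TOP], dp[PATTERN_MID])
--
--         # 패턴 3: 상단과 하단 선택 가능한 경우
--         curr[PATTERN_BOTH] = arr[0][i] + arr[2][i] + dp[PATTERN_MID]
--
--         dp = curr  # 다음 열 계산을 위해 현재 상태 저장
--
--     # 최적화 5: 마지막 열에서 최대 가중치 반환
--     return max(dp)
-- ===== SOURCE B (Python) =====
-- def solution(arr):
--     n = len(arr[0])
--     memo = {}
--
--     def f(i, p):
--         if (i, p) in memo: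
--             return memo[(i, p)]
--         if i == 0:
--             v = (arr[0][0], arr[1][0], arr[2][0], arr[0][0] + arr[2][0])[p]
--         elif p == 0:
--             v = arr[0][i] + max(f(i - 1, 1), f(i - 1, 2))
--         elif p == 1:
--             v = arr[1][i] + max(f(i - 1, 0), f(i - 1, 2), f(i - 1, 3))
--         elif p == 2:
--             v = arr[2][i] + max(f(i - 1, 0), f(i - 1, 1))
--         else:
--             v = arr[0][i] + arr[2][i] + f(i - 1, 1)
--         memo[(i, p)] = v
--         return v
--
--     return max(f(n - 1, p) for p in range(4))
-- ===== Notes on version B (the rewrite author's own statement) =====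
-- stated objective: alternative
-- what changed: Replaced the bottom-up iterative DP with rolling arrays by a top-down memoized recursion f(i, pattern) over a dict memo, answering max over the four patterns at the last column.
import Mathlib
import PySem

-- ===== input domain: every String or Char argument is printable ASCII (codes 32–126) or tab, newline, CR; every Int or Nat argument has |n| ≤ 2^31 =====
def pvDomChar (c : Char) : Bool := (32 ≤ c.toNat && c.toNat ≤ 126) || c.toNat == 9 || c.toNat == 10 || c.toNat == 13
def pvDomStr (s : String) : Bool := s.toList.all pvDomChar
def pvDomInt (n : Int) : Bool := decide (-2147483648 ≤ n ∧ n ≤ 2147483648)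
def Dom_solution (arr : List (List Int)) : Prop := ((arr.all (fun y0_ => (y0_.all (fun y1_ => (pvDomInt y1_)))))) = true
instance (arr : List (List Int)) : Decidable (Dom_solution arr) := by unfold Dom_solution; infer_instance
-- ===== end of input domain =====

-- B replaces the bottom-up rolling-array DP by a top-down memoized recursion on (column, pattern); alternative decomposition, same cost.

-- ===== PORT A =====
-- bottom-up DP: dp is the 4-tuple (TOP, MID, BOT, BOTH) for the current column
def solution (arr : List (List Int)) : Int :=
  let a : Nat → Int → Int := fun j i => PySem.List.pyGetD (arr.getD j []) i 0
  let n : Int := ((arr.getD 0 []).length : Int)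
  let dp0 : Int × Int × Int × Int := (a 0 0, a 1 0, a 2 0, a 0 0 + a 2 0)
  let dp := (PySem.List.pyRange 1 n 1).foldl (fun dp i =>
      (a 0 i + max dp.2.1 dp.2.2.1,
       a 1 i + max (max dp.1 dp.2.2.1) dp.2.2.2,
       a 2 i + max dp.1 dp.2.1,
       a 0 i + a 2 i + dp.2.1)) dp0
  max (max (max dp.1 dp.2.1) dp.2.2.1) dp.2.2.2

-- ===== PORT B =====
-- top-down recursion f(i, p): best total over columns 0..i ending with pattern p
def fAlt (arr : List (List Int)) : Nat → Nat → Int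
  | 0, p =>
      match p with
      | 0 => (arr.getD 0 []).getD 0 0
      | 1 => (arr.getD 1 []).getD 0 0
      | 2 => (arr.getD 2 []).getD 0 0
      | _ => (arr.getD 0 []).getD 0 0 + (arr.getD 2 []).getD 0 0
  | i + 1, p =>
      match p with
      | 0 => (arr.getD 0 []).getD (i + 1) 0 + max (fAlt arr i 1) (fAlt arr i 2)
      | 1 => (arr.getD 1 []).getD (i + 1) 0 + max (max (fAlt arr i 0) (fAlt arr i 2)) (fAlt arr i 3)
      | 2 => (arr.getD 2 []).getD (i + 1) 0 + max (fAlt arr i 0) (fAlt arr i 1)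
      | _ => (arr.getD 0 []).getD (i + 1) 0 + (arr.getD 2 []).getD (i + 1) 0 + fAlt arr i 1

def solution_alt (arr : List (List Int)) : Int :=
  let n := (arr.getD 0 []).length
  max (max (max (fAlt arr (n - 1) 0) (fAlt arr (n - 1) 1)) (fAlt arr (n - 1) 2)) (fAlt arr (n - 1) 3)

-- ===== PRECONDITION & SPEC =====
-- A raises IndexError unless there are at least 3 rows, the first row is nonempty,
-- and rows 1 and 2 are at least as long as row 0; Pre_ excludes exactly those inputs.
def Pre_solution (arr : List (List Int)) : Prop :=
  3 ≤ arr.length ∧ 1 ≤ (arr.getD 0 []).length ∧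
  (arr.getD 0 []).length ≤ (arr.getD 1 []).length ∧
  (arr.getD 0 []).length ≤ (arr.getD 2 []).length
instance (arr : List (List Int)) : Decidable (Pre_solution arr) := by unfold Pre_solution; infer_instance
def pvWitness_solution : List (List Int) := [[1, 2], [3, 4], [5, 6]]

def Spec_solution (arr : List (List Int)) (out : Int) : Prop := out = solution_alt arr
instance (arr : List (List Int)) (out : Int) : Decidable (Spec_solution arr out) := by unfold Spec_solution; infer_instance

-- ===== CLAIM (what is proved, stated in full; the proofs are below) =====
def Claim_equal_solution : Prop := ∀ (arr : List (List Int)), Dom_solution arr → Pre_solution arr → Spec_solution arr (solution arr)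

-- ===== LEMMAS AND PROOFS =====

theorem pv_loop (arr : List (List Int)) (k : Nat) :
    (PySem.List.pyRange 1 ((k : Int) + 1) 1).foldl (fun dp i =>
      (PySem.List.pyGetD (arr.getD 0 []) i 0 + max dp.2.1 dp.2.2.1,
       PySem.List.pyGetD (arr.getD 1 []) i 0 + max (max dp.1 dp.2.2.1) dp.2.2.2,
       PySem.List.pyGetD (arr.getD 2 []) i 0 + max dp.1 dp.2.1,
       PySem.List.pyGetD (arr.getD 0 []) i 0 + PySem.List.pyGetD (arr.getD 2 []) i 0 + dp.2.1))
      (PySem.List.pyGetD (arr.getD 0 []) 0 0, PySem.List.pyGetD (arr.getD 1 []) 0 0,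
       PySem.List.pyGetD (arr.getD 2 []) 0 0,
       PySem.List.pyGetD (arr.getD 0 []) 0 0 + PySem.List.pyGetD (arr.getD 2 []) 0 0)
    = (fAlt arr k 0, fAlt arr k 1, fAlt arr k 2, fAlt arr k 3) := by
  have hc : ∀ (j m : Nat), PySem.List.pyGetD (arr.getD j []) ((m : Nat) : Int) 0
      = (arr.getD j []).getD m 0 := fun j m => PySem.List.pyGetD_natCast _ _ _
  have h0 : ∀ j : Nat, PySem.List.pyGetD (arr.getD j []) (0 : Int) 0
      = (arr.getD j []).getD 0 0 := fun j => hc j 0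
  induction k with
  | zero =>
      rw [PySem.List.pyRange_one_eq_nil (by norm_num)]
      simp [fAlt]
      simp_all
  | succ k ih =>
      have hs : ((k + 1 : Nat) : Int) + 1 = ((k : Int) + 1) + 1 := by push_cast; ring
      rw [hs, PySem.List.pyRange_one_succ_right (by omega), List.foldl_append, ih]
      simp only [List.foldl_cons, List.foldl_nil]
      have h1 : ∀ j : Nat, PySem.List.pyGetD (arr.getD j []) ((k : Int) + 1) 0
          = (arr.getD j []).getD (k + 1) 0 := by
        intro j
        rw [show ((k : Int) + 1) = ((k + 1 : Nat) : Int) by push_cast; ring]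
        exact hc j (k + 1)
      simp [fAlt]
      simp_all

-- ===== VERDICT (by name: the statement is the Claim_ definition above) =====
theorem solution_spec : Claim_equal_solution := by
  intro arr _ hPre
  obtain ⟨-, h1, -, -⟩ := hPre
  unfold Spec_solution solution solution_alt
  obtain ⟨k, hk⟩ : ∃ k, (arr.getD 0 []).length = k + 1 :=
    ⟨(arr.getD 0 []).length - 1, by omega⟩
  simp only [hk]
  rw [show (((k : Nat) + 1 : Nat) : Int) = (k : Int) + 1 by push_cast; ring, pv_loop]
  simp
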